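-- pv_equiv track=rewrite | github.com/su1230su/diaodu | randomDAG.py | endDAG
-- ===== SOURCE A (Python) =====
-- def endDAG(dag):
--     tdag2 = [[0] * (len(dag) + 2) for i in range(len(dag) + 2)]
--     count1 = 0
--     count2 = 0
--     # 终点
--     for m in range(len(dag)):
--         for n in range(len(dag)):
--             if dag[m][n] == 0:
--                 count1 = 1
--             else:
--                 count1 = 0
--                 break
--         if count1:
--             tdag2[m + 1][len(tdag2) - 1] = 1
--             count1 = 0
--     # 起点
--     for m2 in range(len(dag)):
--         for n2 in range(len(dag)):
--             if dag[n2][m2] == 0: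
--                 count2 = 1
--             else:
--                 count2 = 0
--                 break
--         if count2 == 1:
--             tdag2[0][m2 + 1] = 1
--             count2 = 0
--     # 中间copy
--     for m3 in range(len(dag)):
--         for n3 in range(len(dag)):
--             tdag2[m3 + 1][n3 + 1] = dag[m3][n3]
--     #printdag(dag)
--     #printdag(tdag2)
--     # for t in range(len(tdag2)):
--     #     print "tdag2=",tdag2[t]
--     return tdag2
-- ===== SOURCE B (Python) =====
-- def endDAG(dag):
--     n = len(dag)
--     # single combined pass: record which rows/columns contain a nonzero entry
--     nz_rows = set()
--     nz_cols = set()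
--     for i in range(n):
--         for j in range(n):
--             if dag[i][j] != 0:
--                 nz_rows.add(i)
--                 nz_cols.add(j)
--
--     def cell(i, j):
--         if 1 <= i <= n and 1 <= j <= n:
--             return dag[i - 1][j - 1]
--         if i == 0 and 1 <= j <= n and j - 1 not in nz_cols:
--             return 1
--         if j == n + 1 and 1 <= i <= n and i - 1 not in nz_rows:
--             return 1
--         return 0
--
--     return [[cell(i, j) for j in range(n + 2)] for i in range(n + 2)]
-- ===== Notes on version B (the rewrite author's own statement) =====
-- stated objective: alternative
-- what changed: Replaces A's preallocated (n+2)x(n+2) matrix mutated by three separate passes (break-based all-zero-row scan, all-zero-column scan, centre copy) by one combined pass that collects the sets of rows/columns containing a nonzero entry, after which every cell of the result is produced directly by a per-cell formula (centre copy, source/sink marks from the two sets) with no mutation.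
import Mathlib
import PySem

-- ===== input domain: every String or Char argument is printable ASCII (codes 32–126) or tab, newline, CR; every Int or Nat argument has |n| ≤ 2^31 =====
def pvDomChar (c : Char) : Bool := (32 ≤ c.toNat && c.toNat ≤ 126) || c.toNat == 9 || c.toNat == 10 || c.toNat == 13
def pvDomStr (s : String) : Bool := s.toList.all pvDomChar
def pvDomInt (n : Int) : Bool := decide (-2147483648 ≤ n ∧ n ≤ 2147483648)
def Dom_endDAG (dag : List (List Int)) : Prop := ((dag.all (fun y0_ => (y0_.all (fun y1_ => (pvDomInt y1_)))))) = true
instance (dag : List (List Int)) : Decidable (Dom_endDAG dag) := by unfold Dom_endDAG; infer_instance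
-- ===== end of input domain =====

-- B replaces A's preallocate-and-mutate three passes (break-based zero-row scan, zero-column
-- scan, centre copy) by ONE combined pass collecting the sets of nonzero rows/columns, then
-- builds every cell of the result by a direct per-cell formula; same asymptotic cost.

-- ===== PORT A =====
-- dag[m][n] (indices in range under Pre_; pyGetD is exact there)
def pvCell (dag : List (List Int)) (i j : Int) : Int :=
  PySem.List.pyGetD (PySem.List.pyGetD dag i []) j 0

-- tdag2[i][j] = v  (in-range list assignment)
def pvSet (t : List (List Int)) (i j : Nat) (v : Int) : List (List Int) :=
  t.modify i (fun row => row.set j v)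

-- inner 'for n in range(len(dag)): if dag[m][n]==0: count1=1 else: count1=0; break'
def pvScan1 (dag : List (List Int)) (m : Int) : List Int → Int → Int
  | [], c => c
  | j :: js, _c => if pvCell dag m j = 0 then pvScan1 dag m js 1 else 0

-- inner 'for n2 in range(len(dag)): if dag[n2][m2]==0: count2=1 else: count2=0; break'
def pvScan2 (dag : List (List Int)) (m : Int) : List Int → Int → Int
  | [], c => c
  | j :: js, _c => if pvCell dag j m = 0 then pvScan2 dag m js 1 else 0

-- first loop ('终点'): mark all-zero rows as sinks
def pvSink (dag : List (List Int)) : List Int → List (List Int) × Int → List (List Int) × Int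
  | [], s => s
  | m :: ms, (t, c) =>
    let c1 := pvScan1 dag m (PySem.List.pyRange 0 dag.length 1) c
    if c1 ≠ 0 then pvSink dag ms (pvSet t (m.toNat + 1) (t.length - 1) 1, 0)
    else pvSink dag ms (t, c1)

-- second loop ('起点'): mark all-zero columns as sources
def pvSource (dag : List (List Int)) : List Int → List (List Int) × Int → List (List Int) × Int
  | [], s => s
  | m :: ms, (t, c) =>
    let c2 := pvScan2 dag m (PySem.List.pyRange 0 dag.length 1) c
    if c2 = 1 then pvSource dag ms (pvSet t 0 (m.toNat + 1) 1, 0)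
    else pvSource dag ms (t, c2)

-- third loop ('中间copy'): copy dag into the centre
def pvCopy (dag : List (List Int)) (t : List (List Int)) : List (List Int) :=
  (PySem.List.pyRange 0 dag.length 1).foldl (fun t m =>
    (PySem.List.pyRange 0 dag.length 1).foldl (fun t j =>
      pvSet t (m.toNat + 1) (j.toNat + 1) (pvCell dag m j)) t) t

def endDAG (dag : List (List Int)) : List (List Int) :=
  let t0 := List.replicate (dag.length + 2) (List.replicate (dag.length + 2) (0 : Int))
  let r1 := pvSink dag (PySem.List.pyRange 0 dag.length 1) (t0, 0)
  let r2 := pvSource dag (PySem.List.pyRange 0 dag.length 1) (r1.1, 0)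
  pvCopy dag r2.1

-- ===== PORT B =====
-- dag[i][j] in Source B (B-side accessor)
def pvAt (dag : List (List Int)) (i j : Int) : Int :=
  PySem.List.pyGetD (PySem.List.pyGetD dag i []) j 0

-- single combined pass: (nz_rows, nz_cols) after scanning all cells
def pvNZ (dag : List (List Int)) : PySem.Set Int × PySem.Set Int :=
  (PySem.List.pyRange 0 dag.length 1).foldl (fun s i =>
    (PySem.List.pyRange 0 dag.length 1).foldl (fun s j =>
      if pvAt dag i j ≠ 0 then (PySem.Set.add s.1 i, PySem.Set.add s.2 j) else s) s)
    (PySem.Set.empty, PySem.Set.empty)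

-- 'def cell(i, j)' of Source B
def pvCellB (dag : List (List Int)) (rows cols : PySem.Set Int) (i j : Int) : Int :=
  let n : Int := dag.length
  if 1 ≤ i ∧ i ≤ n ∧ 1 ≤ j ∧ j ≤ n then pvAt dag (i - 1) (j - 1)
  else if i = 0 ∧ 1 ≤ j ∧ j ≤ n ∧ ¬ PySem.Set.contains cols (j - 1) then 1
  else if j = n + 1 ∧ 1 ≤ i ∧ i ≤ n ∧ ¬ PySem.Set.contains rows (i - 1) then 1
  else 0

def endDAG_alt (dag : List (List Int)) : List (List Int) :=
  let s := pvNZ dag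
  (PySem.List.pyRange 0 (dag.length + 2) 1).map (fun i =>
    (PySem.List.pyRange 0 (dag.length + 2) 1).map (fun j => pvCellB dag s.1 s.2 i j))

-- ===== PRECONDITION & SPEC =====
-- Pre_ excludes exactly the ragged inputs with a row shorter than len(dag): there the
-- copy loop dag[m3][n3] raises IndexError in A (A never returns on them).
def Pre_endDAG (dag : List (List Int)) : Prop :=
  ∀ row ∈ dag, dag.length ≤ row.length

instance (dag : List (List Int)) : Decidable (Pre_endDAG dag) := by
  unfold Pre_endDAG; infer_instance

def pvWitness_endDAG : List (List Int) := [[0, 1], [0, 0]]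

def Spec_endDAG (dag : List (List Int)) (out : List (List Int)) : Prop := out = endDAG_alt dag
instance (dag : List (List Int)) (out : List (List Int)) : Decidable (Spec_endDAG dag out) := by unfold Spec_endDAG; infer_instance

-- ===== CLAIM (what is proved, stated in full; the proofs are below) =====
def Claim_equal_endDAG : Prop := ∀ (dag : List (List Int)), Dom_endDAG dag → Pre_endDAG dag → Spec_endDAG dag (endDAG dag)

-- ===== LEMMAS AND PROOFS =====

-- n×n access dag[m][j] as a Nat-indexed function (proof-side only)
def pvG (dag : List (List Int)) (m j : Nat) : Int := (dag.getD m []).getD j 0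

def pvRowZ (dag : List (List Int)) (m : Nat) : Bool :=
  (List.range dag.length).all (fun j => pvG dag m j == 0)

def pvColZ (dag : List (List Int)) (j : Nat) : Bool :=
  (List.range dag.length).all (fun i => pvG dag i j == 0)

def pvShape (n : Nat) (t : List (List Int)) : Prop :=
  t.length = n + 2 ∧ ∀ r ∈ t, r.length = n + 2

def pvCellN (t : List (List Int)) (i j : Nat) : Int := (t.getD i []).getD j 0

-- the common value of both ports at cell (i, j)
def pvF (dag : List (List Int)) (i j : Nat) : Int :=
  if 1 ≤ i ∧ i ≤ dag.length ∧ 1 ≤ j ∧ j ≤ dag.length then pvG dag (i-1) (j-1)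
  else if 1 ≤ i ∧ i ≤ dag.length ∧ j = dag.length + 1 ∧ pvRowZ dag (i-1) = true then 1
  else if i = 0 ∧ 1 ≤ j ∧ j ≤ dag.length ∧ pvColZ dag (j-1) = true then 1
  else 0

theorem pvCell_natCast (dag : List (List Int)) (m j : Nat) :
    pvCell dag (m : Int) (j : Int) = pvG dag m j := by
  simp [pvCell, pvG, PySem.List.pyGetD_natCast]

theorem pvShape_pvSet {n : Nat} {t : List (List Int)} (hs : pvShape n t) (i j : Nat) (v : Int) :
    pvShape n (pvSet t i j v) := by
  constructor
  · simp [pvSet, hs.1]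
  · intro r hr
    rw [pvSet, List.mem_iff_getElem?] at hr
    obtain ⟨k, hk⟩ := hr
    rw [List.getElem?_modify] at hk
    simp only [Option.map_eq_map, Option.map_eq_some_iff] at hk
    obtain ⟨row, hkk, hr⟩ := hk
    have hlen := hs.2 row (List.mem_of_getElem? hkk)
    rw [← hr]
    split <;> simp [List.length_set, hlen]

theorem pvCellN_pvSet {n : Nat} {t : List (List Int)} (hs : pvShape n t)
    {i j : Nat} (hi : i < n + 2) (hj : j < n + 2) (v : Int) (i' j' : Nat) :
    pvCellN (pvSet t i j v) i' j' = if i' = i ∧ j' = j then v else pvCellN t i' j' := by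
  simp only [pvCellN, pvSet, List.getD_eq_getElem?_getD, List.getElem?_modify]
  by_cases hii : i = i'
  · subst hii
    have hlt : i < t.length := by rw [hs.1]; omega
    have hrl : t[i].length = n + 2 := hs.2 _ (List.getElem_mem hlt)
    rw [List.getElem?_eq_getElem hlt]
    simp only [Option.map_eq_map, Option.map_some, if_true, Option.getD_some, true_and]
    rw [List.getElem?_set]
    by_cases hjj : j = j'
    · subst hjj
      rw [if_pos rfl, if_pos (show j < t[i].length by rw [hrl]; omega), if_pos rfl]
      rfl
    · rw [if_neg hjj, if_neg fun h => hjj h.symm]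
  · rw [if_neg (fun h => hii h.1.symm)]
    have h2 : (fun a => if i = i' then a.set j v else a) <$> t[i']? = t[i']? := by
      cases t[i']? <;> simp [hii]
    rw [h2]

theorem pvScan1_eq (dag : List (List Int)) (m : Int) :
    ∀ (js : List Int) (c : Int), js ≠ [] →
      pvScan1 dag m js c = if js.all (fun j => pvCell dag m j == 0) then 1 else 0
  | [], _, h => absurd rfl h
  | j :: js, c, _ => by
    by_cases hz : pvCell dag m j = 0
    · cases js with
      | nil => simp [pvScan1, hz]
      | cons j' js' =>
        rw [pvScan1, if_pos hz, pvScan1_eq dag m (j' :: js') 1 (by simp)]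
        simp [hz]
    · simp [pvScan1, hz]

theorem pvScan2_eq (dag : List (List Int)) (m : Int) :
    ∀ (js : List Int) (c : Int), js ≠ [] →
      pvScan2 dag m js c = if js.all (fun j => pvCell dag j m == 0) then 1 else 0
  | [], _, h => absurd rfl h
  | j :: js, c, _ => by
    by_cases hz : pvCell dag j m = 0
    · cases js with
      | nil => simp [pvScan2, hz]
      | cons j' js' =>
        rw [pvScan2, if_pos hz, pvScan2_eq dag m (j' :: js') 1 (by simp)]
        simp [hz]
    · simp [pvScan2, hz]

theorem pvScan1_range (dag : List (List Int)) (hn : 1 ≤ dag.length) (m : Nat) (c : Int) :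
    pvScan1 dag (m : Int) (PySem.List.pyRange 0 (dag.length : Int) 1) c =
      if pvRowZ dag m = true then 1 else 0 := by
  have hne : PySem.List.pyRange 0 (dag.length : Int) 1 ≠ [] := by
    rw [PySem.List.pyRange_zero_natCast]
    simp only [ne_eq, List.map_eq_nil_iff, List.range_eq_nil]
    omega
  rw [pvScan1_eq dag _ _ c hne, PySem.List.pyRange_zero_natCast, List.all_map]
  simp only [Function.comp_def, pvCell_natCast]
  rfl

theorem pvScan2_range (dag : List (List Int)) (hn : 1 ≤ dag.length) (m : Nat) (c : Int) :
    pvScan2 dag (m : Int) (PySem.List.pyRange 0 (dag.length : Int) 1) c =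
      if pvColZ dag m = true then 1 else 0 := by
  have hne : PySem.List.pyRange 0 (dag.length : Int) 1 ≠ [] := by
    rw [PySem.List.pyRange_zero_natCast]
    simp only [ne_eq, List.map_eq_nil_iff, List.range_eq_nil]
    omega
  rw [pvScan2_eq dag _ _ c hne, PySem.List.pyRange_zero_natCast, List.all_map]
  simp only [Function.comp_def, pvCell_natCast]
  rfl

theorem pvSink_cell (dag : List (List Int)) (hn : 1 ≤ dag.length) :
    ∀ (l : List Nat) (t : List (List Int)), pvShape dag.length t → (∀ m ∈ l, m < dag.length) →
      pvShape dag.length (pvSink dag (l.map Int.ofNat) (t, 0)).1 ∧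
      ∀ i j : Nat, pvCellN (pvSink dag (l.map Int.ofNat) (t, 0)).1 i j =
        if ∃ m ∈ l, i = m + 1 ∧ j = dag.length + 1 ∧ pvRowZ dag m = true then 1
        else pvCellN t i j := by
  intro l
  induction l with
  | nil =>
    intro t ht _
    refine ⟨ht, fun i j => ?_⟩
    rw [List.map_nil]
    simp only [pvSink, List.not_mem_nil, false_and, exists_false, if_false]
  | cons m l ih =>
    intro t ht hml
    have hm : m < dag.length := hml m (by simp)
    have hstep : pvSink dag ((m :: l).map Int.ofNat) (t, 0) =
        pvSink dag (l.map Int.ofNat)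
          ((if pvRowZ dag m = true then pvSet t (m + 1) (dag.length + 1) 1 else t), 0) := by
      simp only [List.map_cons, pvSink, Int.ofNat_eq_natCast]
      rw [pvScan1_range dag hn m 0]
      by_cases hz : pvRowZ dag m = true
      · rw [if_pos hz, if_pos (by norm_num), if_pos hz]
        rw [Int.toNat_natCast, ht.1]
        norm_num
      · rw [if_neg hz, if_neg (by norm_num), if_neg hz]
    rw [hstep]
    set t' := if pvRowZ dag m = true then pvSet t (m + 1) (dag.length + 1) 1 else t with ht'def
    have ht' : pvShape dag.length t' := by
      rw [ht'def]; split
      · exact pvShape_pvSet ht _ _ _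
      · exact ht
    obtain ⟨hsh, hcell⟩ := ih t' ht' (fun x hx => hml x (by simp [hx]))
    refine ⟨hsh, fun i j => ?_⟩
    rw [hcell]
    have hct' : pvCellN t' i j =
        if i = m + 1 ∧ j = dag.length + 1 ∧ pvRowZ dag m = true then 1 else pvCellN t i j := by
      rw [ht'def]
      by_cases hz : pvRowZ dag m = true
      · rw [if_pos hz, pvCellN_pvSet ht (by omega) (by omega)]
        simp [hz]
      · simp [hz]
    rw [hct']
    simp only [List.exists_mem_cons_iff]
    by_cases h1 : ∃ m' ∈ l, i = m' + 1 ∧ j = dag.length + 1 ∧ pvRowZ dag m' = true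
    · rw [if_pos h1, if_pos (Or.inr h1)]
    · rw [if_neg h1]
      by_cases h2 : i = m + 1 ∧ j = dag.length + 1 ∧ pvRowZ dag m = true
      · rw [if_pos h2, if_pos (Or.inl h2)]
      · rw [if_neg h2, if_neg (fun hc => hc.elim h2 h1)]

theorem pvSource_cell (dag : List (List Int)) (hn : 1 ≤ dag.length) :
    ∀ (l : List Nat) (t : List (List Int)), pvShape dag.length t → (∀ m ∈ l, m < dag.length) →
      pvShape dag.length (pvSource dag (l.map Int.ofNat) (t, 0)).1 ∧
      ∀ i j : Nat, pvCellN (pvSource dag (l.map Int.ofNat) (t, 0)).1 i j =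
        if i = 0 ∧ ∃ m ∈ l, j = m + 1 ∧ pvColZ dag m = true then 1
        else pvCellN t i j := by
  intro l
  induction l with
  | nil =>
    intro t ht _
    refine ⟨ht, fun i j => ?_⟩
    simp [pvSource]
  | cons m l ih =>
    intro t ht hml
    have hm : m < dag.length := hml m (by simp)
    have hstep : pvSource dag ((m :: l).map Int.ofNat) (t, 0) =
        pvSource dag (l.map Int.ofNat)
          ((if pvColZ dag m = true then pvSet t 0 (m + 1) 1 else t), 0) := by
      simp only [List.map_cons, pvSource, Int.ofNat_eq_natCast]
      rw [pvScan2_range dag hn m 0]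
      by_cases hz : pvColZ dag m = true
      · rw [if_pos hz, if_pos (by norm_num), if_pos hz]
        rw [Int.toNat_natCast]
      · rw [if_neg hz, if_neg (by norm_num), if_neg hz]
    rw [hstep]
    set t' := if pvColZ dag m = true then pvSet t 0 (m + 1) 1 else t with ht'def
    have ht' : pvShape dag.length t' := by
      rw [ht'def]; split
      · exact pvShape_pvSet ht _ _ _
      · exact ht
    obtain ⟨hsh, hcell⟩ := ih t' ht' (fun x hx => hml x (by simp [hx]))
    refine ⟨hsh, fun i j => ?_⟩
    rw [hcell]
    have hct' : pvCellN t' i j =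
        if i = 0 ∧ j = m + 1 ∧ pvColZ dag m = true then 1 else pvCellN t i j := by
      rw [ht'def]
      by_cases hz : pvColZ dag m = true
      · rw [if_pos hz, pvCellN_pvSet ht (by omega) (by omega)]
        simp [hz]
      · simp [hz]
    rw [hct']
    simp only [List.exists_mem_cons_iff]
    by_cases h1 : i = 0 ∧ ∃ m' ∈ l, j = m' + 1 ∧ pvColZ dag m' = true
    · rw [if_pos h1, if_pos ⟨h1.1, Or.inr h1.2⟩]
    · rw [if_neg h1]
      by_cases h2 : i = 0 ∧ j = m + 1 ∧ pvColZ dag m = true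
      · rw [if_pos h2, if_pos ⟨h2.1, Or.inl h2.2⟩]
      · rw [if_neg h2, if_neg (fun hc => hc.2.elim (fun ha => h2 ⟨hc.1, ha⟩) (fun hb => h1 ⟨hc.1, hb⟩))]

theorem pvCopy_inner_cell (dag : List (List Int)) (m : Nat) (hm : m < dag.length) :
    ∀ (l : List Nat) (t : List (List Int)), pvShape dag.length t → (∀ j ∈ l, j < dag.length) →
      pvShape dag.length (l.foldl (fun t j => pvSet t (m + 1) (j + 1) (pvG dag m j)) t) ∧
      ∀ i j' : Nat, pvCellN (l.foldl (fun t j => pvSet t (m + 1) (j + 1) (pvG dag m j)) t) i j' =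
        if i = m + 1 ∧ ∃ jj ∈ l, j' = jj + 1 then pvG dag m (j' - 1)
        else pvCellN t i j' := by
  intro l
  induction l with
  | nil =>
    intro t ht _
    refine ⟨ht, fun i j' => ?_⟩
    simp only [List.foldl_nil, List.not_mem_nil, false_and, exists_false, and_false, if_false]
  | cons jj l ih =>
    intro t ht hjl
    have hj : jj < dag.length := hjl jj (by simp)
    rw [List.foldl_cons]
    obtain ⟨hsh, hcell⟩ := ih (pvSet t (m + 1) (jj + 1) (pvG dag m jj))
      (pvShape_pvSet ht _ _ _) (fun x hx => hjl x (by simp [hx]))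
    refine ⟨hsh, fun i j' => ?_⟩
    rw [hcell, pvCellN_pvSet ht (by omega) (by omega)]
    simp only [List.exists_mem_cons_iff]
    by_cases h1 : i = m + 1 ∧ ∃ x ∈ l, j' = x + 1
    · rw [if_pos h1, if_pos ⟨h1.1, Or.inr h1.2⟩]
    · rw [if_neg h1]
      by_cases h2 : i = m + 1 ∧ j' = jj + 1
      · rw [if_pos h2, if_pos ⟨h2.1, Or.inl h2.2⟩]
        rw [h2.2]
        simp
      · rw [if_neg h2, if_neg (fun hc => hc.2.elim (fun ha => h2 ⟨hc.1, ha⟩)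
          (fun hb => h1 ⟨hc.1, hb⟩))]

theorem pvCopy_cell (dag : List (List Int)) :
    ∀ (l : List Nat) (t : List (List Int)), pvShape dag.length t → (∀ m ∈ l, m < dag.length) →
      pvShape dag.length
        (l.foldl (fun t m => (List.range dag.length).foldl
          (fun t j => pvSet t (m + 1) (j + 1) (pvG dag m j)) t) t) ∧
      ∀ i j : Nat, pvCellN
        (l.foldl (fun t m => (List.range dag.length).foldl
          (fun t j => pvSet t (m + 1) (j + 1) (pvG dag m j)) t) t) i j =
        if (∃ m ∈ l, i = m + 1) ∧ 1 ≤ j ∧ j ≤ dag.length then pvG dag (i - 1) (j - 1)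
        else pvCellN t i j := by
  intro l
  induction l with
  | nil =>
    intro t ht _
    refine ⟨ht, fun i j => ?_⟩
    simp only [List.foldl_nil, List.not_mem_nil, false_and, exists_false, false_and, if_false]
  | cons m l ih =>
    intro t ht hml
    have hm : m < dag.length := hml m (by simp)
    rw [List.foldl_cons]
    have hrange : ∀ j ∈ List.range dag.length, j < dag.length := fun j hj => List.mem_range.mp hj
    obtain ⟨hshI, hcellI⟩ := pvCopy_inner_cell dag m hm (List.range dag.length) t ht hrange
    obtain ⟨hsh, hcell⟩ := ih _ hshI (fun x hx => hml x (by simp [hx]))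
    refine ⟨hsh, fun i j => ?_⟩
    rw [hcell, hcellI]
    simp only [List.exists_mem_cons_iff, List.mem_range]
    have hiff : (∃ jj, jj < dag.length ∧ j = jj + 1) ↔ (1 ≤ j ∧ j ≤ dag.length) := by
      constructor
      · rintro ⟨jj, hjj, rfl⟩; omega
      · rintro ⟨h1, h2⟩; exact ⟨j - 1, by omega, by omega⟩
    by_cases h1 : (∃ m' ∈ l, i = m' + 1) ∧ 1 ≤ j ∧ j ≤ dag.length
    · rw [if_pos h1, if_pos ⟨Or.inr h1.1, h1.2⟩]
    · rw [if_neg h1]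
      by_cases h2 : i = m + 1 ∧ 1 ≤ j ∧ j ≤ dag.length
      · have : i = m + 1 ∧ ∃ jj, jj < dag.length ∧ j = jj + 1 := ⟨h2.1, hiff.mpr h2.2⟩
        rw [if_pos this, if_pos ⟨Or.inl h2.1, h2.2⟩, h2.1]
        simp
      · have hne : ¬ (i = m + 1 ∧ ∃ jj, jj < dag.length ∧ j = jj + 1) := by
          intro hc
          exact h2 ⟨hc.1, hiff.mp hc.2⟩
        rw [if_neg hne, if_neg (fun hc => hc.1.elim (fun ha => h2 ⟨ha, hc.2⟩)
          (fun hb => h1 ⟨hb, hc.2⟩))]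

theorem pvCopy_eq (dag : List (List Int)) (t : List (List Int)) :
    pvCopy dag t = (List.range dag.length).foldl
      (fun t m => (List.range dag.length).foldl
        (fun t j => pvSet t (m + 1) (j + 1) (pvG dag m j)) t) t := by
  unfold pvCopy
  rw [PySem.List.pyRange_zero_natCast, List.foldl_map]
  apply PySem.List.foldl_congr_mem
  intro acc m hm
  rw [List.foldl_map]
  apply PySem.List.foldl_congr_mem
  intro acc2 j hj
  rw [pvCell_natCast]
  simp [pvSet, Int.toNat_natCast]

theorem pvCellN_t0 (n : Nat) (i j : Nat) :
    pvCellN (List.replicate (n + 2) (List.replicate (n + 2) (0 : Int))) i j = 0 := by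
  simp only [pvCellN, List.getD_eq_getElem?_getD, List.getElem?_replicate]
  split
  · simp only [Option.getD_some, List.getElem?_replicate]
    split <;> rfl
  · rfl

theorem pvShape_t0 (n : Nat) :
    pvShape n (List.replicate (n + 2) (List.replicate (n + 2) (0 : Int))) := by
  constructor
  · simp
  · intro r hr
    rw [List.eq_of_mem_replicate hr]
    simp

theorem endDAG_cell (dag : List (List Int)) (hn : 1 ≤ dag.length) :
    pvShape dag.length (endDAG dag) ∧
    ∀ i j : Nat, pvCellN (endDAG dag) i j = pvF dag i j := by
  have hrange : ∀ m ∈ List.range dag.length, m < dag.length := fun m hm => List.mem_range.mp hm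
  have hpy : PySem.List.pyRange 0 (dag.length : Int) 1 = (List.range dag.length).map Int.ofNat := by
    rw [PySem.List.pyRange_zero_natCast]
    simp [Int.ofNat_eq_natCast]
  obtain ⟨hs1, hc1⟩ := pvSink_cell dag hn (List.range dag.length)
    (List.replicate (dag.length + 2) (List.replicate (dag.length + 2) (0 : Int)))
    (pvShape_t0 dag.length) hrange
  obtain ⟨hs2, hc2⟩ := pvSource_cell dag hn (List.range dag.length) _ hs1 hrange
  obtain ⟨hs3, hc3⟩ := pvCopy_cell dag (List.range dag.length) _ hs2 hrange
  have hE : endDAG dag = (List.range dag.length).foldl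
      (fun t m => (List.range dag.length).foldl
        (fun t j => pvSet t (m + 1) (j + 1) (pvG dag m j)) t)
      (pvSource dag ((List.range dag.length).map Int.ofNat)
        ((pvSink dag ((List.range dag.length).map Int.ofNat)
          (List.replicate (dag.length + 2) (List.replicate (dag.length + 2) (0 : Int)), 0)).1,
         0)).1 := by
    show pvCopy dag _ = _
    rw [pvCopy_eq]
    rw [hpy]
  refine ⟨by rw [hE]; exact hs3, fun i j => ?_⟩
  rw [hE, hc3, hc2, hc1, pvCellN_t0]
  have e1 : (∃ m ∈ List.range dag.length, i = m + 1 ∧ j = dag.length + 1 ∧ pvRowZ dag m = true)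
      ↔ (1 ≤ i ∧ i ≤ dag.length ∧ j = dag.length + 1 ∧ pvRowZ dag (i - 1) = true) := by
    constructor
    · rintro ⟨m, hm, rfl, hj, hz⟩
      rw [List.mem_range] at hm
      exact ⟨by omega, by omega, hj, by simpa using hz⟩
    · rintro ⟨h1, h2, hj, hz⟩
      exact ⟨i - 1, List.mem_range.mpr (by omega), by omega, hj, hz⟩
  have e2 : (i = 0 ∧ ∃ m ∈ List.range dag.length, j = m + 1 ∧ pvColZ dag m = true)
      ↔ (i = 0 ∧ 1 ≤ j ∧ j ≤ dag.length ∧ pvColZ dag (j - 1) = true) := by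
    constructor
    · rintro ⟨hi, m, hm, rfl, hz⟩
      rw [List.mem_range] at hm
      exact ⟨hi, by omega, by omega, by simpa using hz⟩
    · rintro ⟨hi, h1, h2, hz⟩
      exact ⟨hi, j - 1, List.mem_range.mpr (by omega), by omega, hz⟩
  have e3 : ((∃ m ∈ List.range dag.length, i = m + 1) ∧ 1 ≤ j ∧ j ≤ dag.length)
      ↔ (1 ≤ i ∧ i ≤ dag.length ∧ 1 ≤ j ∧ j ≤ dag.length) := by
    constructor
    · rintro ⟨⟨m, hm, rfl⟩, h3, h4⟩
      rw [List.mem_range] at hm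
      exact ⟨by omega, by omega, h3, h4⟩
    · rintro ⟨h1, h2, h3, h4⟩
      exact ⟨⟨i - 1, List.mem_range.mpr (by omega), by omega⟩, h3, h4⟩
  rw [pvF]
  simp only [e1, e2, e3]
  split_ifs <;> rfl

-- ===== B side =====

theorem pvAt_eq_pvCell (dag : List (List Int)) (i j : Int) : pvAt dag i j = pvCell dag i j := rfl

-- one step of the inner loop of pvNZ (nat-indexed)
def pvNZstep (dag : List (List Int)) (i : Nat)
    (s : PySem.Set Int × PySem.Set Int) (j : Nat) : PySem.Set Int × PySem.Set Int :=
  if pvG dag i j ≠ 0 then (PySem.Set.add s.1 (i : Int), PySem.Set.add s.2 (j : Int)) else s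

theorem pvNZ_inner_mem (dag : List (List Int)) (i : Nat) (l : List Nat)
    (s : PySem.Set Int × PySem.Set Int) (x : Int) :
    (x ∈ (l.foldl (pvNZstep dag i) s).1 ↔
       x ∈ s.1 ∨ (x = (i : Int) ∧ ∃ j ∈ l, pvG dag i j ≠ 0)) ∧
    (x ∈ (l.foldl (pvNZstep dag i) s).2 ↔
       x ∈ s.2 ∨ ∃ j ∈ l, x = (j : Int) ∧ pvG dag i j ≠ 0) := by
  induction l generalizing s with
  | nil => simp
  | cons j l ih =>
    rw [List.foldl_cons]
    obtain ⟨ih1, ih2⟩ := ih (pvNZstep dag i s j)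
    constructor
    · rw [ih1]
      unfold pvNZstep
      by_cases hz : pvG dag i j ≠ 0
      · rw [if_pos hz]
        simp only [PySem.Set.mem_add, List.exists_mem_cons_iff]
        constructor
        · rintro (⟨h | h⟩ | h)
          · exact Or.inl h
          · exact Or.inr ⟨h, Or.inl hz⟩
          · exact Or.inr ⟨h.1, Or.inr h.2⟩
        · rintro (h | ⟨hx, h | h⟩)
          · exact Or.inl (Or.inl h)
          · exact Or.inl (Or.inr hx)
          · exact Or.inr ⟨hx, h⟩
      · rw [if_neg hz]
        simp only [List.exists_mem_cons_iff]
        constructor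
        · rintro (h | ⟨hx, h⟩)
          · exact Or.inl h
          · exact Or.inr ⟨hx, Or.inr h⟩
        · rintro (h | ⟨hx, h | h⟩)
          · exact Or.inl h
          · exact absurd h hz
          · exact Or.inr ⟨hx, h⟩
    · rw [ih2]
      unfold pvNZstep
      by_cases hz : pvG dag i j ≠ 0
      · rw [if_pos hz]
        simp only [PySem.Set.mem_add, List.exists_mem_cons_iff]
        constructor
        · rintro (⟨h | h⟩ | h)
          · exact Or.inl h
          · exact Or.inr (Or.inl ⟨h, hz⟩)
          · exact Or.inr (Or.inr h)
        · rintro (h | ⟨hx, _⟩ | h)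
          · exact Or.inl (Or.inl h)
          · exact Or.inl (Or.inr hx)
          · exact Or.inr h
      · rw [if_neg hz]
        simp only [List.exists_mem_cons_iff]
        constructor
        · rintro (h | h)
          · exact Or.inl h
          · exact Or.inr (Or.inr h)
        · rintro (h | ⟨_, h⟩ | h)
          · exact Or.inl h
          · exact absurd h hz
          · exact Or.inr h

theorem pvNZ_outer_mem (dag : List (List Int)) (l : List Nat)
    (s : PySem.Set Int × PySem.Set Int) (x : Int) :
    (x ∈ (l.foldl (fun s i => (List.range dag.length).foldl (pvNZstep dag i) s) s).1 ↔
       x ∈ s.1 ∨ ∃ i ∈ l, x = (i : Int) ∧ ∃ j < dag.length, pvG dag i j ≠ 0) ∧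
    (x ∈ (l.foldl (fun s i => (List.range dag.length).foldl (pvNZstep dag i) s) s).2 ↔
       x ∈ s.2 ∨ ∃ j < dag.length, x = (j : Int) ∧ ∃ i ∈ l, pvG dag i j ≠ 0) := by
  induction l generalizing s with
  | nil => simp
  | cons i l ih =>
    rw [List.foldl_cons]
    obtain ⟨ih1, ih2⟩ := ih ((List.range dag.length).foldl (pvNZstep dag i) s)
    obtain ⟨hi1, hi2⟩ := pvNZ_inner_mem dag i (List.range dag.length) s x
    constructor
    · rw [ih1, hi1]
      simp only [List.exists_mem_cons_iff, List.mem_range]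
      constructor
      · rintro ((h | ⟨hx, j, hj, hz⟩) | h)
        · exact Or.inl h
        · exact Or.inr (Or.inl ⟨hx, j, hj, hz⟩)
        · exact Or.inr (Or.inr h)
      · rintro (h | ⟨hx, j, hj, hz⟩ | h)
        · exact Or.inl (Or.inl h)
        · exact Or.inl (Or.inr ⟨hx, j, hj, hz⟩)
        · exact Or.inr h
    · rw [ih2, hi2]
      simp only [List.exists_mem_cons_iff, List.mem_range]
      constructor
      · rintro ((h | ⟨j, hj, hx, hz⟩) | ⟨j, hj, hx, i', hi', hz⟩)
        · exact Or.inl h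
        · exact Or.inr ⟨j, hj, hx, Or.inl hz⟩
        · exact Or.inr ⟨j, hj, hx, Or.inr ⟨i', hi', hz⟩⟩
      · rintro (h | ⟨j, hj, hx, hz | ⟨i', hi', hz⟩⟩)
        · exact Or.inl (Or.inl h)
        · exact Or.inl (Or.inr ⟨j, hj, hx, hz⟩)
        · exact Or.inr ⟨j, hj, hx, i', hi', hz⟩

theorem pvNZ_eq (dag : List (List Int)) :
    pvNZ dag = (List.range dag.length).foldl
      (fun s i => (List.range dag.length).foldl (pvNZstep dag i) s)
      (PySem.Set.empty, PySem.Set.empty) := by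
  unfold pvNZ
  rw [PySem.List.pyRange_zero_natCast, List.foldl_map]
  apply PySem.List.foldl_congr_mem
  intro acc i hi
  rw [List.foldl_map]
  apply PySem.List.foldl_congr_mem
  intro acc2 j hj
  unfold pvNZstep
  rw [pvAt_eq_pvCell, pvCell_natCast]

theorem pvNZ_rows_mem (dag : List (List Int)) (k : Nat) (hk : k < dag.length) :
    ((k : Int) ∈ (pvNZ dag).1) ↔ pvRowZ dag k = false := by
  rw [pvNZ_eq]
  obtain ⟨h1, _⟩ := pvNZ_outer_mem dag (List.range dag.length)
    (PySem.Set.empty, PySem.Set.empty) (k : Int)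
  rw [h1]
  unfold pvRowZ
  simp only [PySem.Set.empty, List.not_mem_nil, false_or, List.mem_range,
    List.all_eq_false, List.mem_range]
  constructor
  · rintro ⟨i, _, hx, j, hj, hz⟩
    have : i = k := by exact_mod_cast hx.symm
    subst this
    exact ⟨j, hj, by simpa using hz⟩
  · rintro ⟨j, hj, hz⟩
    exact ⟨k, hk, rfl, j, hj, by simpa using hz⟩

theorem pvNZ_cols_mem (dag : List (List Int)) (k : Nat) (hk : k < dag.length) :
    ((k : Int) ∈ (pvNZ dag).2) ↔ pvColZ dag k = false := by
  rw [pvNZ_eq]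
  obtain ⟨_, h2⟩ := pvNZ_outer_mem dag (List.range dag.length)
    (PySem.Set.empty, PySem.Set.empty) (k : Int)
  rw [h2]
  unfold pvColZ
  simp only [PySem.Set.empty, List.not_mem_nil, false_or, List.mem_range,
    List.all_eq_false, List.mem_range]
  constructor
  · rintro ⟨j, _, hx, i, hi, hz⟩
    have : j = k := by exact_mod_cast hx.symm
    subst this
    exact ⟨i, hi, by simpa using hz⟩
  · rintro ⟨i, hi, hz⟩
    exact ⟨k, hk, rfl, i, hi, by simpa using hz⟩

theorem pvCellB_eq_pvF (dag : List (List Int)) (i j : Nat) :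
    pvCellB dag (pvNZ dag).1 (pvNZ dag).2 (i : Int) (j : Int) = pvF dag i j := by
  have hcr : ∀ k : Nat, k < dag.length →
      (PySem.Set.contains (pvNZ dag).1 (k : Int) = true ↔ pvRowZ dag k = false) := by
    intro k hk
    rw [PySem.Set.contains_iff]
    exact pvNZ_rows_mem dag k hk
  have hcc : ∀ k : Nat, k < dag.length →
      (PySem.Set.contains (pvNZ dag).2 (k : Int) = true ↔ pvColZ dag k = false) := by
    intro k hk
    rw [PySem.Set.contains_iff]
    exact pvNZ_cols_mem dag k hk
  unfold pvCellB pvF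
  by_cases hA : 1 ≤ i ∧ i ≤ dag.length ∧ 1 ≤ j ∧ j ≤ dag.length
  · rw [if_pos (by omega), if_pos hA]
    have hi : ((i : Int) - 1) = ((i - 1 : Nat) : Int) := by omega
    have hj : ((j : Int) - 1) = ((j - 1 : Nat) : Int) := by omega
    rw [hi, hj, pvAt_eq_pvCell, pvCell_natCast]
  · rw [if_neg (by omega), if_neg hA]
    by_cases hB : i = 0 ∧ 1 ≤ j ∧ j ≤ dag.length
    · have hjc : ((j : Int) - 1) = ((j - 1 : Nat) : Int) := by omega
      rw [if_neg (show ¬ (1 ≤ i ∧ i ≤ dag.length ∧ j = dag.length + 1 ∧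
            pvRowZ dag (i - 1) = true) from by rintro ⟨h1, -, -, -⟩; omega)]
      by_cases hz : pvColZ dag (j - 1) = true
      · rw [if_pos (show ((i : Int) = 0 ∧ 1 ≤ (j : Int) ∧ (j : Int) ≤ (dag.length : Int) ∧
              ¬ PySem.Set.contains (pvNZ dag).2 ((j : Int) - 1)) from by
            refine ⟨by omega, by omega, by omega, ?_⟩
            rw [hjc]
            intro hcont
            have := (hcc (j - 1) (by omega)).mp hcont
            simp [hz] at this),
          if_pos ⟨hB.1, hB.2.1, hB.2.2, hz⟩]
      · rw [if_neg (show ¬ ((i : Int) = 0 ∧ 1 ≤ (j : Int) ∧ (j : Int) ≤ (dag.length : Int) ∧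
              ¬ PySem.Set.contains (pvNZ dag).2 ((j : Int) - 1)) from by
            rintro ⟨-, -, -, hcont⟩
            rw [hjc] at hcont
            exact hcont ((hcc (j - 1) (by omega)).mpr (by simpa using hz))),
          if_neg (show ¬ ((j : Int) = (dag.length : Int) + 1 ∧ 1 ≤ (i : Int) ∧
              (i : Int) ≤ (dag.length : Int) ∧
              ¬ PySem.Set.contains (pvNZ dag).1 ((i : Int) - 1)) from by
            rintro ⟨-, h1, -, -⟩; omega),
          if_neg (fun hc => hz hc.2.2.2)]
    · by_cases hC : 1 ≤ i ∧ i ≤ dag.length ∧ j = dag.length + 1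
      · have hic : ((i : Int) - 1) = ((i - 1 : Nat) : Int) := by omega
        rw [if_neg (show ¬ ((i : Int) = 0 ∧ 1 ≤ (j : Int) ∧ (j : Int) ≤ (dag.length : Int) ∧
              ¬ PySem.Set.contains (pvNZ dag).2 ((j : Int) - 1)) from by
            rintro ⟨h0, -, -, -⟩; omega)]
        by_cases hz : pvRowZ dag (i - 1) = true
        · rw [if_pos (show ((j : Int) = (dag.length : Int) + 1 ∧ 1 ≤ (i : Int) ∧
                (i : Int) ≤ (dag.length : Int) ∧
                ¬ PySem.Set.contains (pvNZ dag).1 ((i : Int) - 1)) from by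
              refine ⟨by omega, by omega, by omega, ?_⟩
              rw [hic]
              intro hcont
              have := (hcr (i - 1) (by omega)).mp hcont
              simp [hz] at this),
            if_pos ⟨hC.1, hC.2.1, hC.2.2, hz⟩]
        · rw [if_neg (show ¬ ((j : Int) = (dag.length : Int) + 1 ∧ 1 ≤ (i : Int) ∧
                (i : Int) ≤ (dag.length : Int) ∧
                ¬ PySem.Set.contains (pvNZ dag).1 ((i : Int) - 1)) from by
              rintro ⟨-, -, -, hcont⟩
              rw [hic] at hcont
              exact hcont ((hcr (i - 1) (by omega)).mpr (by simpa using hz))),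
            if_neg (fun hc => hz hc.2.2.2),
            if_neg (fun hc => hB ⟨hc.1, hc.2.1, hc.2.2.1⟩)]
      · rw [if_neg (show ¬ ((i : Int) = 0 ∧ 1 ≤ (j : Int) ∧ (j : Int) ≤ (dag.length : Int) ∧
              ¬ PySem.Set.contains (pvNZ dag).2 ((j : Int) - 1)) from by
            rintro ⟨h0, h1, h2, -⟩
            exact hB ⟨by omega, by omega, by omega⟩),
          if_neg (show ¬ ((j : Int) = (dag.length : Int) + 1 ∧ 1 ≤ (i : Int) ∧
              (i : Int) ≤ (dag.length : Int) ∧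
              ¬ PySem.Set.contains (pvNZ dag).1 ((i : Int) - 1)) from by
            rintro ⟨hj1, h1, h2, -⟩
            exact hC ⟨by omega, by omega, by omega⟩),
          if_neg (fun hc => hC ⟨hc.1, hc.2.1, hc.2.2.1⟩),
          if_neg (fun hc => hB ⟨hc.1, hc.2.1, hc.2.2.1⟩)]

theorem pvF_out_zero (dag : List (List Int)) (i j : Nat)
    (h : ¬ (i < dag.length + 2 ∧ j < dag.length + 2)) : pvF dag i j = 0 := by
  unfold pvF
  split_ifs with h1 h2 h3
  · obtain ⟨a, b, c, d⟩ := h1; omega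
  · obtain ⟨a, b, c, _⟩ := h2; omega
  · obtain ⟨a, b, c, _⟩ := h3; omega
  · rfl

theorem endDAG_alt_cell (dag : List (List Int)) :
    pvShape dag.length (endDAG_alt dag) ∧
    ∀ i j : Nat, pvCellN (endDAG_alt dag) i j = pvF dag i j := by
  have hrw : endDAG_alt dag = (List.range (dag.length + 2)).map (fun (i : Nat) =>
      (List.range (dag.length + 2)).map (fun (j : Nat) =>
        pvCellB dag (pvNZ dag).1 (pvNZ dag).2 (i : Int) (j : Int))) := by
    unfold endDAG_alt
    rw [show ((dag.length : Int) + 2) = ((dag.length + 2 : Nat) : Int) from by push_cast; ring,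
        PySem.List.pyRange_zero_natCast, List.map_map]
    refine List.map_congr_left fun i _ => ?_
    rw [Function.comp_apply, List.map_map]
    rfl
  rw [hrw]
  constructor
  · constructor
    · simp
    · intro r hr
      simp only [List.mem_map, List.mem_range] at hr
      obtain ⟨i, _, rfl⟩ := hr
      simp
  · intro i j
    unfold pvCellN
    by_cases hi : i < dag.length + 2
    · by_cases hj : j < dag.length + 2
      · simp only [List.getD_eq_getElem?_getD, List.getElem?_map, List.getElem?_range hi,
          List.getElem?_range hj, Option.map_some, Option.getD_some]
        exact pvCellB_eq_pvF dag i j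
      · simp only [List.getD_eq_getElem?_getD, List.getElem?_map, List.getElem?_range hi,
          Option.map_some, Option.getD_some]
        rw [List.getElem?_eq_none (by simp; omega)]
        exact (pvF_out_zero dag i j (by omega)).symm
    · rw [show ((List.range (dag.length + 2)).map (fun (i : Nat) =>
            (List.range (dag.length + 2)).map (fun (j : Nat) =>
              pvCellB dag (pvNZ dag).1 (pvNZ dag).2 (i : Int) (j : Int)))).getD i [] = []
          from List.getD_eq_default _ _ (by simp; omega), List.getD_nil]
      exact (pvF_out_zero dag i j (by omega)).symm

theorem pv_eq_of_shape_cell (n : Nat) (t u : List (List Int))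
    (ht : pvShape n t) (hu : pvShape n u)
    (h : ∀ i j : Nat, pvCellN t i j = pvCellN u i j) : t = u := by
  apply List.ext_getElem (by rw [ht.1, hu.1])
  intro i hi hi'
  apply List.ext_getElem
  · rw [ht.2 _ (List.getElem_mem hi), hu.2 _ (List.getElem_mem hi')]
  · intro j hj hj'
    have := h i j
    simp only [pvCellN, List.getD_eq_getElem?_getD, List.getElem?_eq_getElem hi,
      List.getElem?_eq_getElem hi', Option.getD_some, List.getElem?_eq_getElem hj,
      List.getElem?_eq_getElem hj'] at this
    exact this

-- ===== VERDICT (by name: the statement is the Claim_ definition above) =====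
theorem endDAG_spec : Claim_equal_endDAG := by
  intro dag _hdom hpre
  unfold Spec_endDAG
  by_cases hd : dag = []
  · subst hd; decide
  · have hn : 1 ≤ dag.length := List.length_pos_iff.mpr hd
    obtain ⟨hsA, hcA⟩ := endDAG_cell dag hn
    obtain ⟨hsB, hcB⟩ := endDAG_alt_cell dag
    exact pv_eq_of_shape_cell dag.length _ _ hsA hsB (fun i j => by rw [hcA, hcB])
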